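-- pv_equiv track=rewrite | github.com/Stressica1/viper- | scripts/monitoring/github_mcp_integration.py | _has_organized_imports
-- ===== SOURCE A (Python) =====
-- def _has_organized_imports(content: str) -> bool:
--     """Check if imports are properly organized"""
--     lines = content.split('\n')
--     imports_section = False
--     standard_lib_imports = []
--     third_party_imports = []
--     local_imports = []
--
--     for line in lines:
--         stripped = line.strip()
--         if stripped.startswith('import ') or stripped.startswith('from '):
--             imports_section = True
--             if 'viper' in stripped or stripped.startswith('from scripts'):
--                 local_imports.append(stripped)
--             elif '.' not in stripped.split()[1].split('.')[0]:
--                 standard_lib_imports.append(stripped)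
--             else:
--                 third_party_imports.append(stripped)
--         elif imports_section and stripped and not stripped.startswith('#'):
--             # End of imports section
--             break
--
--     # Check if imports are in correct order
--     all_imports = standard_lib_imports + third_party_imports + local_imports
--     original_imports = [line for line in lines if line.strip().startswith(('import ', 'from '))]
--
--     return len(all_imports) == len(original_imports)
-- ===== SOURCE B (Python) =====
-- def _has_organized_imports(content: str) -> bool:
--     """Check if imports are properly organized (single pass, early exit)."""
--     in_imports = False
--     past_section = False
--     for line in content.split('\n'):
--         stripped = line.strip()
--         if stripped.startswith('import ') or stripped.startswith('from '):
--             if past_section: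
--                 return False
--             in_imports = True
--         elif in_imports and stripped and not stripped.startswith('#'):
--             past_section = True
--     return True
-- ===== Notes on version B (the rewrite author's own statement) =====
-- stated objective: simpler
-- what changed: B replaces A's three classification lists, break-loop and second full rescan with a single pass over the lines keeping two boolean flags and returning False as soon as an import line appears after the imports section ended.
import Mathlib
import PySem

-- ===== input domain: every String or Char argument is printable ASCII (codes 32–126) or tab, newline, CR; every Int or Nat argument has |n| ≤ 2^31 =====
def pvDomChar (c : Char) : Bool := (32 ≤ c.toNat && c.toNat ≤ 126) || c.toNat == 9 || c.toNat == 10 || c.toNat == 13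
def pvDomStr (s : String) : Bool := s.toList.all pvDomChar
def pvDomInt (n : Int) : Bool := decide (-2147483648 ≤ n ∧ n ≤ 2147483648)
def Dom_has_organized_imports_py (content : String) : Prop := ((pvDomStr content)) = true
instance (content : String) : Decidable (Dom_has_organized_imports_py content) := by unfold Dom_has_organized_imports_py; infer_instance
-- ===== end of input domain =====

-- B is a single pass with two boolean flags and an early exit, instead of A's
-- classification-lists loop plus a second full rescan; same return value everywhere.

-- ===== PORT A =====
-- the `for line in lines` loop of A, with its break (returning the accumulated state);
-- `split()[1]` / `split('.')[0]` can never miss in Python (an import line has ≥ 2 words,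
-- split('.') is never empty), so `getD ""` / `headD ""` is exact here
def pvLoopA : List String → Bool → List String → List String → List String →
    Bool × List String × List String × List String
  | [], sec, std, tp, loc => (sec, std, tp, loc)
  | l :: rest, sec, std, tp, loc =>
    let s := PySem.Str.strip l
    if PySem.Str.startswith s "import " || PySem.Str.startswith s "from " then
      if PySem.Str.isIn "viper" s || PySem.Str.startswith s "from scripts" then
        pvLoopA rest true std tp (loc ++ [s])
      else if !PySem.Str.isIn "." (((PySem.Str.split? ((PySem.Str.split₀ s).getD 1 "") ".").getD []).headD "") then
        pvLoopA rest true (std ++ [s]) tp loc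
      else
        pvLoopA rest true std (tp ++ [s]) loc
    else if sec && (s != "") && !(PySem.Str.startswith s "#") then
      (sec, std, tp, loc)   -- break
    else
      pvLoopA rest sec std tp loc

def has_organized_imports_py (content : String) : Bool :=
  let lines := (PySem.Str.split? content "\n").getD []
  let r := pvLoopA lines false [] [] []
  let all_imports := r.2.1 ++ r.2.2.1 ++ r.2.2.2
  let original_imports := lines.filter (fun line =>
    PySem.Str.startswith (PySem.Str.strip line) "import " ||
    PySem.Str.startswith (PySem.Str.strip line) "from ")
  decide (all_imports.length = original_imports.length)

-- ===== PORT B =====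
def pvLoopB : List String → Bool → Bool → Bool
  | [], _, _ => true
  | l :: rest, inImp, past =>
    let s := PySem.Str.strip l
    if PySem.Str.startswith s "import " || PySem.Str.startswith s "from " then
      if past then false else pvLoopB rest true past
    else if inImp && (s != "") && !(PySem.Str.startswith s "#") then
      pvLoopB rest inImp true
    else
      pvLoopB rest inImp past

def has_organized_imports_py_alt (content : String) : Bool :=
  pvLoopB ((PySem.Str.split? content "\n").getD []) false false

-- ===== PRECONDITION & SPEC =====
def Spec_has_organized_imports_py (content : String) (out : Bool) : Prop := out = has_organized_imports_py_alt content
instance (content : String) (out : Bool) : Decidable (Spec_has_organized_imports_py content out) := by unfold Spec_has_organized_imports_py; infer_instance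

-- ===== CLAIM (what is proved, stated in full; the proofs are below) =====
def Claim_equal_has_organized_imports_py : Prop := ∀ (content : String), Dom_has_organized_imports_py content → Spec_has_organized_imports_py content (has_organized_imports_py content)

-- ===== LEMMAS AND PROOFS =====
def pvIsImp (l : String) : Bool :=
  PySem.Str.startswith (PySem.Str.strip l) "import " ||
  PySem.Str.startswith (PySem.Str.strip l) "from "

-- once past_section is set, B returns true iff no import line remains
lemma pvLoopB_past (lines : List String) : ∀ inImp,
    pvLoopB lines inImp true = decide (lines.countP pvIsImp = 0) := by
  induction lines with
  | nil => intro inImp; simp [pvLoopB]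
  | cons l rest ih =>
    intro inImp
    simp only [pvLoopB]
    split
    next hc =>
      have hl : pvIsImp l = true := hc
      simp [hl]
    next hc =>
      have hl : pvIsImp l = false := by simpa [pvIsImp] using hc
      split <;> rw [ih] <;> simp [hl]

-- A's accumulated import count matches the total count iff B's one-pass scan accepts
lemma pvLoopA_count (lines : List String) : ∀ (sec : Bool) (std tp loc : List String),
    ((pvLoopA lines sec std tp loc).2.1.length + (pvLoopA lines sec std tp loc).2.2.1.length
      + (pvLoopA lines sec std tp loc).2.2.2.length
      = std.length + tp.length + loc.length + lines.countP pvIsImp)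
    ↔ pvLoopB lines sec false = true := by
  induction lines with
  | nil => intro sec std tp loc; simp [pvLoopA, pvLoopB]
  | cons l rest ih =>
    intro sec std tp loc
    simp only [pvLoopA, pvLoopB]
    split
    next hc =>
      have hl : pvIsImp l = true := hc
      rw [List.countP_cons]
      simp only [hl, if_true, Bool.false_eq_true, if_false]
      split
      · rw [← ih true std tp (loc ++ [PySem.Str.strip l])]
        simp only [List.length_append, List.length_cons, List.length_nil]
        omega
      · split
        · rw [← ih true (std ++ [PySem.Str.strip l]) tp loc]
          simp only [List.length_append, List.length_cons, List.length_nil]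
          omega
        · rw [← ih true std (tp ++ [PySem.Str.strip l]) loc]
          simp only [List.length_append, List.length_cons, List.length_nil]
          omega
    next hc =>
      have hl : pvIsImp l = false := by simpa [pvIsImp] using hc
      rw [List.countP_cons]
      simp only [hl, Bool.false_eq_true, if_false, Nat.add_zero]
      split
      · rw [pvLoopB_past]
        simp only [decide_eq_true_eq]
        omega
      · exact ih sec std tp loc

-- ===== VERDICT (by name: the statement is the Claim_ definition above) =====
theorem has_organized_imports_py_spec : Claim_equal_has_organized_imports_py := by
  intro content _
  unfold Spec_has_organized_imports_py has_organized_imports_py has_organized_imports_py_alt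
  have h := pvLoopA_count ((PySem.Str.split? content "\n").getD []) false [] [] []
  simp only [List.length_nil, Nat.zero_add] at h
  have hf : (List.filter (fun line =>
        PySem.Str.startswith (PySem.Str.strip line) "import " ||
        PySem.Str.startswith (PySem.Str.strip line) "from ")
      ((PySem.Str.split? content "\n").getD [])).length
      = List.countP pvIsImp ((PySem.Str.split? content "\n").getD []) :=
    List.countP_eq_length_filter.symm
  simp only [List.length_append]
  rw [hf]
  cases hb : pvLoopB ((PySem.Str.split? content "\n").getD []) false false with
  | true => rw [hb] at h; exact decide_eq_true (h.mpr rfl)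
  | false =>
    rw [hb] at h
    exact decide_eq_false (fun hx => absurd (h.mp hx) (by simp))
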